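-- pv_equiv track=rewrite | github.com/pypi-data/pypi-mirror-131 | packages/greenpeace/greenpeace-0.1.tar.gz/greenpeace-0.1/greenpeace/import_inspector.py | to_package_candidates
-- ===== SOURCE A (Python) =====
-- from typing import List, Tuple, Dict, Set
--
-- def to_package_candidates(module: str) -> List[str]:
--     split = module.split(".")
--     result = []
--
--     package = split[0]
--     result.append(package)
--     for i in range(1, len(split)):
--         package = f"{package}.{split[i]}"
--         result.append(package)
--
--     return result
-- ===== SOURCE B (Python) =====
-- def to_package_candidates(module: str):
--     split = module.split(".")
--     return [".".join(split[:i]) for i in range(1, len(split) + 1)]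
-- ===== Notes on version B (the rewrite author's own statement) =====
-- stated objective: simpler
-- what changed: Replaces the accumulator-threading loop (extending one growing string and appending it each iteration) by direct per-prefix construction: each candidate is built independently as the join of the first i segments.
import Mathlib
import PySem

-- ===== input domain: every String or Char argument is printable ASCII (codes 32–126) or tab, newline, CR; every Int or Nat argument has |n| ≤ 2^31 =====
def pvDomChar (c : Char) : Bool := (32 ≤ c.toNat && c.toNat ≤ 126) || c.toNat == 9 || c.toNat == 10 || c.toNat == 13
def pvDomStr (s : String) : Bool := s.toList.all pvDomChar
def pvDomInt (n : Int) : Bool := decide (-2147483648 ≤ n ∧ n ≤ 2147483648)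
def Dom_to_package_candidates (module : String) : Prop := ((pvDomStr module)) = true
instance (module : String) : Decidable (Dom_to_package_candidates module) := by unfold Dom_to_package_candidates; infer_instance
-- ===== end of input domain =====

-- B builds each dotted prefix directly as the join of the first i segments instead of
-- threading a growing accumulator string through a loop; same cost, different decomposition.

-- ===== PORT A =====
def to_package_candidates (module : String) : List String :=
  -- split? is always `some` here since the separator "." is nonempty
  let split := (PySem.Str.split? module ".").getD []
  match split with
  | [] => []  -- unreachable: str.split with a nonempty separator never returns []
  | p :: _ =>
    let st := (PySem.List.pyRange 1 ((split.length : Int)) 1).foldl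
      (fun (s : String × List String) i =>
        let package := s.1 ++ "." ++ PySem.List.pyGetD split i ""
        (package, s.2 ++ [package])) (p, [p])
    st.2

-- ===== PORT B =====
def to_package_candidates_alt (module : String) : List String :=
  let split := (PySem.Str.split? module ".").getD []
  (PySem.List.pyRange 1 ((split.length : Int) + 1) 1).map
    (fun i => PySem.Str.join "." (PySem.List.slice split none (some i)))

-- ===== PRECONDITION & SPEC =====
def Spec_to_package_candidates (module : String) (out : List String) : Prop := out = to_package_candidates_alt module
instance (module : String) (out : List String) : Decidable (Spec_to_package_candidates module out) := by unfold Spec_to_package_candidates; infer_instance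

-- ===== CLAIM (what is proved, stated in full; the proofs are below) =====
def Claim_equal_to_package_candidates : Prop := ∀ (module : String), Dom_to_package_candidates module → Spec_to_package_candidates module (to_package_candidates module)

-- ===== LEMMAS AND PROOFS =====

-- Chars-level: absorbing the separator-joined pair into the head of a join
theorem chars_join_absorb (sep x y : List Char) (rest : List (List Char)) :
    PySem.Chars.join sep (x :: y :: rest) = PySem.Chars.join sep ((x ++ sep ++ y) :: rest) := by
  cases rest with
  | nil => simp [PySem.Chars.join_cons_cons, PySem.Chars.join_singleton]
  | cons z zs => simp [PySem.Chars.join_cons_cons]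

-- Str-level versions
theorem str_join_pair (p a : String) : PySem.Str.join "." [p, a] = p ++ "." ++ a := by
  apply String.toList_inj.mp
  simp [PySem.Str.toList_join, PySem.Chars.join_cons_cons, PySem.Chars.join_singleton]

theorem str_join_absorb (p a : String) (xs : List String) :
    PySem.Str.join "." (p :: a :: xs) = PySem.Str.join "." ((p ++ "." ++ a) :: xs) := by
  apply String.toList_inj.mp
  simp only [PySem.Str.toList_join, List.map_cons, String.toList_append]
  exact chars_join_absorb _ _ _ _

-- the loop of A, characterised: acc plus one join per processed prefix
theorem fold_snd (rest : List String) : ∀ (pkg : String) (acc : List String),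
    (rest.foldl (fun (s : String × List String) seg =>
        (s.1 ++ "." ++ seg, s.2 ++ [s.1 ++ "." ++ seg])) (pkg, acc)).2
    = acc ++ (List.range rest.length).map
        (fun k => PySem.Str.join "." (pkg :: rest.take (k + 1))) := by
  induction rest with
  | nil => intro pkg acc; simp
  | cons a rest ih =>
    intro pkg acc
    rw [List.foldl_cons, ih]
    simp only [List.length_cons, List.range_succ_eq_map, List.map_cons, List.map_map,
      Function.comp_def, List.take_succ_cons, List.take_zero, Nat.succ_eq_add_one]
    rw [str_join_pair]
    have hm : (fun k => PySem.Str.join "." (pkg :: a :: List.take (k + 1) rest))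
        = (fun k => PySem.Str.join "." ((pkg ++ "." ++ a) :: List.take (k + 1) rest)) :=
      funext fun k => str_join_absorb pkg a _
    rw [hm]
    simp

-- B, characterised over the split list
theorem alt_eq_map_take (l : List String) :
    (PySem.List.pyRange 1 ((l.length : Int) + 1) 1).map
      (fun i => PySem.Str.join "." (PySem.List.slice l none (some i)))
    = (List.range l.length).map (fun k => PySem.Str.join "." (l.take (k + 1))) := by
  rw [PySem.List.pyRange_one]
  have hlen : ((l.length : Int) + 1 - 1).toNat = l.length := by omega
  rw [hlen]
  simp only [List.map_map]
  apply List.map_congr_left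
  intro k _
  simp only [Function.comp_apply]
  have h : (1 : Int) + (k : Int) = ((k + 1 : Nat) : Int) := by push_cast; ring
  rw [h, PySem.List.slice_to_natCast]

-- ===== VERDICT (by name: the statement is the Claim_ definition above) =====
theorem to_package_candidates_spec : Claim_equal_to_package_candidates := by
  intro module _
  unfold Spec_to_package_candidates to_package_candidates to_package_candidates_alt
  rw [alt_eq_map_take]
  cases h : (PySem.Str.split? module ".").getD [] with
  | nil => simp
  | cons p rest =>
    simp only [List.length_cons]
    have hcast : ((rest.length + 1 : Nat) : Int) = (rest.length : Int) + 1 := by push_cast; ring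
    rw [hcast]
    have := PySem.List.foldl_pyRange_pyGetD' (p :: rest) ""
      (fun (s : String × List String) seg =>
        (s.1 ++ "." ++ seg, s.2 ++ [s.1 ++ "." ++ seg])) (p, [p]) (a := 1) (by norm_num)
    simp only [List.length_cons] at this
    rw [hcast] at this  -- align the numeral bound shape if needed
    rw [this]
    simp only [Int.toNat_one, List.drop_one, List.tail_cons]
    rw [fold_snd]
    simp only [List.range_succ_eq_map, List.map_cons, List.map_map, List.take_succ_cons,
      List.take_zero]
    have hp : PySem.Str.join "." [p] = p := by
      apply String.toList_inj.mp
      simp [PySem.Str.toList_join, PySem.Chars.join_singleton]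
    rw [hp]
    simp only [List.singleton_append]
    congr 1
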